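-- pv_equiv track=rewrite | github.com/VosDeMens/Toki-Musi | src/whistle_analysis.py | generate_scored_augmentation_alternatives
-- ===== SOURCE A (Python) =====
-- def generate_scored_augmentation_alternatives(
--     augs: list[str], max_dev: int = 2
-- ) -> list[tuple[list[str], int]]:
--     """Generates the possible ways to deviate from the provided augmentations.
--
--     Adding or removing one augmentation is considered one change.
--     Does not change the first note.
--
--     Parameters
--     ----------
--     augs : list[str]
--         A string of augmentation characters per note.
--     max_dev : int, optional
--         The max number of changes to make to the augmentations, by default 2
--
--     Returns
--     -------
--     list[tuple[list[str], int]]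
--         A `list` of augmentation values per note, that are within the provided deviation range,
--         with a number indicating the amount of deviations for that `list`.
--
--     Examples
--     -------
--     >>> generate_scored_augmentation_alternatives(["_", "", ""], 2)
--     [(['_', '', ''], 0), (['_', '', '_'], 1), (['_', '_', ''], 1), (['_', '_', '_'], 2)]
--     """
--     result: list[tuple[list[str], int]] = [(augs[:1], 0)]
--     for aug in augs[1:]:
--         new_result: list[tuple[list[str], int]] = []
--         for current, dev_score in result:
--             if dev_score >= max_dev:
--                 continue
--             new_result.append((current + [aug], dev_score))
--             if "_" in aug:
--                 new_result.append((current + [aug.replace("_", "")], dev_score + 1))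
--             else:
--                 new_result.append((current + ["_" + aug], dev_score + 1))
--         result = new_result
--     return result
-- ===== SOURCE B (Python) =====
-- def generate_scored_augmentation_alternatives(augs, max_dev=2):
--     # DFS over flip/keep choices, pruning as soon as the deviation budget is
--     # exhausted before the last position; builds each surviving alternative
--     # once, in the same order as the level-by-level expansion.
--     n = len(augs)
--     out = []
--
--     def dfs(i, prefix, dev):
--         if i >= n:
--             out.append((prefix, dev))
--         elif dev < max_dev:
--             aug = augs[i]
--             flipped = aug.replace("_", "") if "_" in aug else "_" + aug
--             dfs(i + 1, prefix + [aug], dev)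
--             dfs(i + 1, prefix + [flipped], dev + 1)
--
--     dfs(1, augs[:1], 0)
--     return out
-- ===== Notes on version B (the rewrite author's own statement) =====
-- stated objective: alternative
-- what changed: Replaces A's level-by-level rebuilding of every partial alternative list (BFS with per-level new_result lists) by a single pruned depth-first recursion over positions that emits each surviving alternative once, in the same order.
import Mathlib
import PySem

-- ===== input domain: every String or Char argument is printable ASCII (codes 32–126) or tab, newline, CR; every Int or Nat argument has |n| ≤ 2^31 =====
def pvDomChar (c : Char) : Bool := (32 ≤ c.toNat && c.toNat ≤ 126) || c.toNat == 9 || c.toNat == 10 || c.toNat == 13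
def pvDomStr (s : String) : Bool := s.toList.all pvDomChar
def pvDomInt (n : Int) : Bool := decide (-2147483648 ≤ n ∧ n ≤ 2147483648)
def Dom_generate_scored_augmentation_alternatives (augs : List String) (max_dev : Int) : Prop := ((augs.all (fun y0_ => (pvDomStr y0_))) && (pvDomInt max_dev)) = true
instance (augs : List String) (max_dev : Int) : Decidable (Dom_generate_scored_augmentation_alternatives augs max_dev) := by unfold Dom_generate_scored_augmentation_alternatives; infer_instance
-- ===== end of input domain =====

-- B replaces A's level-by-level (BFS) rebuilding of all partial alternatives with a pruned
-- depth-first recursion that emits each surviving alternative once, in the same order (objective: alternative).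


-- ===== PORT A =====
-- literal transliteration of A: fold over augs[1:], rebuilding new_result from result each level
def generate_scored_augmentation_alternatives (augs : List String) (max_dev : Int) : List (List String × Int) :=
  (PySem.List.slice augs (some 1) none).foldl
    (fun result aug =>
      result.foldl
        (fun new_result cd =>
          if cd.2 ≥ max_dev then new_result    -- continue
          else
            let nr1 := new_result ++ [(cd.1 ++ [aug], cd.2)]
            if PySem.Str.isIn "_" aug then
              nr1 ++ [(cd.1 ++ [PySem.Str.replace aug "_" ""], cd.2 + 1)]
            else
              nr1 ++ [(cd.1 ++ [String.ofList ('_' :: aug.toList)], cd.2 + 1)])   -- "_" + aug, exact concatenation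
        [])
    [(PySem.List.slice augs none (some 1), 0)]

-- ===== PORT B =====
-- flipped = aug.replace("_","") if "_" in aug else "_" + aug
def pvFlip (aug : String) : String :=
  if PySem.Str.isIn "_" aug then PySem.Str.replace aug "_" ""
  else String.ofList ('_' :: aug.toList)

-- the recursive dfs of Source B: structural recursion on the remaining augs (Source B's index i)
def pvDfs (max_dev : Int) : List String → List String → Int → List (List String × Int)
  | [], pre, dev => [(pre, dev)]
  | aug :: rest, pre, dev =>
      if dev < max_dev then
        pvDfs max_dev rest (pre ++ [aug]) dev ++ pvDfs max_dev rest (pre ++ [pvFlip aug]) (dev + 1)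
      else []

def generate_scored_augmentation_alternatives_alt (augs : List String) (max_dev : Int) : List (List String × Int) :=
  pvDfs max_dev (PySem.List.slice augs (some 1) none) (PySem.List.slice augs none (some 1)) 0

-- ===== PRECONDITION & SPEC =====
def Spec_generate_scored_augmentation_alternatives (augs : List String) (max_dev : Int) (out : List (List String × Int)) : Prop := out = generate_scored_augmentation_alternatives_alt augs max_dev
instance (augs : List String) (max_dev : Int) (out : List (List String × Int)) : Decidable (Spec_generate_scored_augmentation_alternatives augs max_dev out) := by unfold Spec_generate_scored_augmentation_alternatives; infer_instance

-- ===== CLAIM (what is proved, stated in full; the proofs are below) =====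
def Claim_equal_generate_scored_augmentation_alternatives : Prop := ∀ (augs : List String) (max_dev : Int), Dom_generate_scored_augmentation_alternatives augs max_dev → Spec_generate_scored_augmentation_alternatives augs max_dev (generate_scored_augmentation_alternatives augs max_dev)

-- ===== LEMMAS AND PROOFS =====

-- what one level of A's inner loop contributes for one entry
def pvExpand (max_dev : Int) (aug : String) (cd : List String × Int) : List (List String × Int) :=
  if cd.2 ≥ max_dev then []
  else [(cd.1 ++ [aug], cd.2), (cd.1 ++ [pvFlip aug], cd.2 + 1)]

-- A's inner loop is a flatMap of pvExpand
theorem pv_inner_eq_flatMap (max_dev : Int) (aug : String) (res : List (List String × Int)) :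
    ∀ acc : List (List String × Int),
      res.foldl
        (fun new_result cd =>
          if cd.2 ≥ max_dev then new_result
          else
            let nr1 := new_result ++ [(cd.1 ++ [aug], cd.2)]
            if PySem.Str.isIn "_" aug then
              nr1 ++ [(cd.1 ++ [PySem.Str.replace aug "_" ""], cd.2 + 1)]
            else
              nr1 ++ [(cd.1 ++ [String.ofList ('_' :: aug.toList)], cd.2 + 1)]) acc
      = acc ++ res.flatMap (pvExpand max_dev aug) := by
  induction res with
  | nil => intro acc; simp
  | cons cd rest ih =>
      intro acc
      simp only [List.foldl_cons, List.flatMap_cons, ih]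
      by_cases h : cd.2 ≥ max_dev <;>
        by_cases h2 : PySem.Chars.isIn ['_'] aug.toList = true <;>
          simp [pvExpand, pvFlip, h, h2, List.append_assoc]

-- A's outer loop over `rest`, started from any entry list, is the flatMap of B's dfs
theorem pv_levels_eq_dfs (max_dev : Int) (rest : List String) :
    ∀ res : List (List String × Int),
      rest.foldl
        (fun result aug =>
          result.foldl
            (fun new_result cd =>
              if cd.2 ≥ max_dev then new_result
              else
                let nr1 := new_result ++ [(cd.1 ++ [aug], cd.2)]
                if PySem.Str.isIn "_" aug then
                  nr1 ++ [(cd.1 ++ [PySem.Str.replace aug "_" ""], cd.2 + 1)]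
                else
                  nr1 ++ [(cd.1 ++ [String.ofList ('_' :: aug.toList)], cd.2 + 1)]) [])
        res
      = res.flatMap (fun cd => pvDfs max_dev rest cd.1 cd.2) := by
  induction rest with
  | nil =>
      intro res
      simp [pvDfs]
  | cons aug rest ih =>
      intro res
      simp only [List.foldl_cons]
      rw [ih, pv_inner_eq_flatMap, List.nil_append, List.flatMap_assoc]
      apply List.flatMap_congr      -- pointwise: expanding one entry then dfs = dfs of the full level
      intro cd _
      by_cases h : cd.2 ≥ max_dev
      · simp [pvExpand, pvDfs, h, not_lt.mpr h]
      · simp [pvExpand, pvDfs, h, lt_of_not_ge h]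

-- ===== VERDICT (by name: the statement is the Claim_ definition above) =====
theorem generate_scored_augmentation_alternatives_spec : Claim_equal_generate_scored_augmentation_alternatives := by
  intro augs max_dev _
  unfold Spec_generate_scored_augmentation_alternatives
  unfold generate_scored_augmentation_alternatives generate_scored_augmentation_alternatives_alt
  rw [pv_levels_eq_dfs]
  simp
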